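-- pv_equiv track=rewrite | github.com/tugscollarnervously/pennant_fever | old_versions/pennant_race_v.0.0.64.py | get_lineup_position
-- ===== SOURCE A (Python) =====
-- def get_lineup_position(dice_number):
--     """Return the lineup position based on the two-digit dice roll."""
--     dice_map = {
--         range(11, 13): 1,   # 11-12
--         range(13, 15): 2,   # 13-14
--         range(15, 17): 3,   # 15-16
--         range(21, 23): 4,   # 21-22
--         range(23, 25): 5,   # 23-24
--         range(25, 27): 6,   # 25-26
--         range(31, 33): 7,   # 31-32
--         range(33, 35): 8,   # 33-34
--         range(35, 37): 9,   # 35-36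
--         range(41, 44): 10,  # 41-43
--         range(44, 47): 11,  # 44-46
--         range(51, 54): 12,  # 51-53
--         range(54, 57): 13,  # 54-56
--         range(61, 64): 14,  # 61-63
--         range(64, 67): 15   # 64-66
--     }
--
--     for dice_range, position in dice_map.items():
--         if dice_number in dice_range:
--             return position
--     raise ValueError(f"Invalid dice number: {dice_number}")
-- ===== SOURCE B (Python) =====
-- # One flat table from every valid roll to its position, built once; the body is a single lookup.
-- _POSITION = {
--     start + offset: pos
--     for pos, (start, width) in enumerate(
--         [(11, 2), (13, 2), (15, 2), (21, 2), (23, 2), (25, 2),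
--          (31, 2), (33, 2), (35, 2),
--          (41, 3), (44, 3), (51, 3), (54, 3), (61, 3), (64, 3)], 1)
--     for offset in range(width)
-- }
--
-- def get_lineup_position(dice_number):
--     """Return the lineup position based on the two-digit dice roll."""
--     try:
--         return _POSITION[dice_number]
--     except KeyError:
--         raise ValueError(f"Invalid dice number: {dice_number}")
-- ===== Notes on version B (the rewrite author's own statement) =====
-- stated objective: simpler
-- what changed: Replaced the per-call loop scanning fifteen ranges with one flat roll-to-position dict built once at module level, so the body is a single O(1) lookup.
import Mathlib
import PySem

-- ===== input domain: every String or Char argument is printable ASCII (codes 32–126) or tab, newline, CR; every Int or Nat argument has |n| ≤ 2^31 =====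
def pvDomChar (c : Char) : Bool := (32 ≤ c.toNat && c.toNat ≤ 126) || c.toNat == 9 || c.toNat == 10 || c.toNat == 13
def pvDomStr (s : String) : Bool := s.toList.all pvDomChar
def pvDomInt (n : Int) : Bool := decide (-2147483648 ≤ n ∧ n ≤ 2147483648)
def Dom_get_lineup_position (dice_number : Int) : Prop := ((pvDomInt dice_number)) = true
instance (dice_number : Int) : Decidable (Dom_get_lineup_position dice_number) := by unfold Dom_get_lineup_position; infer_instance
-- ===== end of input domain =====

-- B builds one flat roll→position table once and does a single lookup; A scans fifteen ranges per call (objective: simpler).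

-- ===== PORT A =====
-- A's dict maps range objects to positions and scans them in insertion order.
def pvDiceRanges : List (Int × Int × Int) :=
  [(11, 13, 1), (13, 15, 2), (15, 17, 3), (21, 23, 4), (23, 25, 5), (25, 27, 6),
   (31, 33, 7), (33, 35, 8), (35, 37, 9), (41, 44, 10), (44, 47, 11),
   (51, 54, 12), (54, 57, 13), (61, 64, 14), (64, 67, 15)]

-- the for-loop over dice_map.items(); 0 is the sentinel for the raising branch (excluded by Pre_)
def pvScanRanges : List (Int × Int × Int) → Int → Int
  | [], _ => 0
  | (lo, hi, pos) :: rest, n => if lo ≤ n ∧ n < hi then pos else pvScanRanges rest n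

def get_lineup_position (dice_number : Int) : Int :=
  pvScanRanges pvDiceRanges dice_number

-- ===== PORT B =====
def pvStarts : List (Int × Int) :=
  [(11, 2), (13, 2), (15, 2), (21, 2), (23, 2), (25, 2), (31, 2), (33, 2), (35, 2),
   (41, 3), (44, 3), (51, 3), (54, 3), (61, 3), (64, 3)]

-- the module-level dict comprehension of Source B
def pvPositionTable : PySem.Dict Int Int :=
  (PySem.List.enumerate pvStarts 1).foldl
    (fun d p =>
      (PySem.List.pyRange 0 p.2.2 1).foldl
        (fun d off => PySem.Dict.insert d (p.2.1 + off) p.1) d)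
    PySem.Dict.empty

-- the lookup; 0 stands for the raising KeyError branch (excluded by Pre_)
def get_lineup_position_alt (dice_number : Int) : Int :=
  PySem.Dict.getD pvPositionTable dice_number 0

-- ===== PRECONDITION & SPEC =====
-- Pre_ admits exactly the valid two-digit rolls (digits 1–6); elsewhere both Pythons raise ValueError.
def Pre_get_lineup_position (dice_number : Int) : Prop :=
  11 ≤ dice_number ∧ dice_number ≤ 66 ∧ 1 ≤ dice_number % 10 ∧ dice_number % 10 ≤ 6
instance (dice_number : Int) : Decidable (Pre_get_lineup_position dice_number) := by
  unfold Pre_get_lineup_position; infer_instance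

def pvWitness_get_lineup_position : Int := 43

def Spec_get_lineup_position (dice_number : Int) (out : Int) : Prop := out = get_lineup_position_alt dice_number
instance (dice_number : Int) (out : Int) : Decidable (Spec_get_lineup_position dice_number out) := by unfold Spec_get_lineup_position; infer_instance

-- ===== CLAIM (what is proved, stated in full; the proofs are below) =====
def Claim_equal_get_lineup_position : Prop := ∀ (dice_number : Int), Dom_get_lineup_position dice_number → Pre_get_lineup_position dice_number → Spec_get_lineup_position dice_number (get_lineup_position dice_number)

-- ===== LEMMAS AND PROOFS =====

-- ===== VERDICT (by name: the statement is the Claim_ definition above) =====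
set_option maxRecDepth 8000 in
theorem get_lineup_position_spec : Claim_equal_get_lineup_position := by
  intro n _ hpre
  obtain ⟨h1, h2, _, _⟩ := hpre
  unfold Spec_get_lineup_position
  interval_cases n <;> rfl
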